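-- pv_equiv track=rewrite | github.com/combikms/PS_BOJ | 그래프와순회/9205.py | DFS
-- ===== SOURCE A (Python) =====
-- def DFS(graph):
--     visited = [False] * len(graph)
--     stack = [0]
--
--     while stack:
--         cur = stack.pop()
--         if not visited[cur]:
--             visited[cur] = True
--             for i in range (len(graph)):
--                 if not visited[i]:
--                     dist = abs(graph[i][0] - graph[cur][0]) + abs(graph[i][1] - graph[cur][1])
--                     if dist <= 1000:
--                         if i == len(graph) - 1:
--                             return "happy"
--                         else:
--                             stack.append(i)
--
--     return "sad"
-- ===== SOURCE B (Python) =====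
-- def DFS(graph):
--     n = len(graph)
--     reach = [False] * n
--     reach[0] = True
--     changed = True
--     while changed:
--         changed = False
--         for i in range(n):
--             if not reach[i] and any(
--                 reach[j]
--                 and abs(graph[i][0] - graph[j][0]) + abs(graph[i][1] - graph[j][1]) <= 1000
--                 for j in range(n)
--             ):
--                 reach[i] = True
--                 changed = True
--     return "happy" if n >= 2 and reach[n - 1] else "sad"
-- ===== Notes on version B (the rewrite author's own statement) =====
-- stated objective: alternative
-- what changed: Replaces the explicit-stack DFS with early return by an iterate-to-fixpoint reachability closure (repeatedly mark every point adjacent to an already-marked point until nothing changes), then a single final test of whether the last point was marked.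
import Mathlib
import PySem

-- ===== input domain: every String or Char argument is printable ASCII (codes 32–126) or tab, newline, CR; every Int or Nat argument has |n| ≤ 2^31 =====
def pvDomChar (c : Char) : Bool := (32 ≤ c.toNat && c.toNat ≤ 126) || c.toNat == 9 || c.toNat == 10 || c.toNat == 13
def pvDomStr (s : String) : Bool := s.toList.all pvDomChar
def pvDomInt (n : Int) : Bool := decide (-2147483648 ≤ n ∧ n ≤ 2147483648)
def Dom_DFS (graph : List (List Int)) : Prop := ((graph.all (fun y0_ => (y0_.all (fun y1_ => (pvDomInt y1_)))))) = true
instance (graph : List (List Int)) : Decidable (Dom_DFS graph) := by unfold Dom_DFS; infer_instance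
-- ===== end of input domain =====

-- B replaces A's explicit-stack DFS by an iterate-to-fixpoint reachability closure; equal return value proved on Pre_ (neither version mutates its argument).

-- ===== PORT A =====
-- Manhattan distance between points i and cur (rows have ≥ 2 entries under Pre_; getD is exact there)
def pvDistA (graph : List (List Int)) (i cur : Nat) : Int :=
  |((graph.getD i []).getD 0 0) - ((graph.getD cur []).getD 0 0)| +
  |((graph.getD i []).getD 1 0) - ((graph.getD cur []).getD 1 0)|

-- the inner `for i in range(len(graph))` of A: `none` = early `return "happy"`, `some ps` = indices appended to the stack (in order)
def pvScanA (graph : List (List Int)) (visited : List Bool) (cur : Nat) : List Nat → Option (List Nat)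
  | [] => some []
  | i :: rest =>
    if visited.getD i false = false then
      if pvDistA graph i cur ≤ 1000 then
        if i = graph.length - 1 then none
        else match pvScanA graph visited cur rest with
          | none => none
          | some ps => some (i :: ps)
      else pvScanA graph visited cur rest
    else pvScanA graph visited cur rest

lemma pv_count_false_set (l : List Bool) (k : Nat) (hk : k < l.length)
    (hf : l.getD k false = false) : (l.set k true).count false < l.count false := by
  induction l generalizing k with
  | nil => simp at hk
  | cons b t ih =>
    cases k with
    | zero =>
      simp [List.getD] at hf
      simp [hf, List.count_cons]
    | succ k =>
      simp [List.getD] at hf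
      simp at hk
      have := ih k hk (by simpa [List.getD] using hf)
      simp only [List.set, List.count_cons]
      omega

-- the `while stack:` loop of A; stack head = Python's list end (pop/append site)
def DFSloopA (graph : List (List Int)) (visited : List Bool) (stack : List Nat) : String :=
  match stack with
  | [] => "sad"
  | cur :: rest =>
    if visited.getD cur false then DFSloopA graph visited rest
    else if h : cur < visited.length then
      match pvScanA graph (visited.set cur true) cur (List.range graph.length) with
      | none => "happy"
      | some ps => DFSloopA graph (visited.set cur true) (ps.reverse ++ rest)
    else "sad"  -- unreachable under Pre_DFS (Python raises IndexError here); totality guard only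
termination_by ((visited.count false), stack.length)
decreasing_by
  · apply Prod.Lex.right; simp
  · apply Prod.Lex.left
    exact pv_count_false_set visited cur h (by simpa using ‹¬ visited.getD cur false = true›)

def DFS (graph : List (List Int)) : String :=
  DFSloopA graph (List.replicate graph.length false) [0]

-- ===== PORT B =====
def pvDistB (graph : List (List Int)) (i j : Nat) : Int :=
  |((graph.getD i []).getD 0 0) - ((graph.getD j []).getD 0 0)| +
  |((graph.getD i []).getD 1 0) - ((graph.getD j []).getD 1 0)|

-- the short-circuiting `any(reach[j] and dist <= 1000 for j in range(n))`
def pvNearB (graph : List (List Int)) (reach : List Bool) (i : Nat) : List Nat → Bool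
  | [] => false
  | j :: rest => (reach.getD j false && decide (pvDistB graph i j ≤ 1000)) || pvNearB graph reach i rest

-- one full `for i in range(n)` pass, threading (reach, changed)
def pvPassB (graph : List (List Int)) : List Nat → List Bool → Bool → List Bool × Bool
  | [], reach, changed => (reach, changed)
  | i :: rest, reach, changed =>
    if reach.getD i false = false && pvNearB graph reach i (List.range graph.length) then
      if _h : i < reach.length then
        pvPassB graph rest (reach.set i true) true
      else pvPassB graph rest reach changed  -- unreachable under Pre_DFS (Python raises IndexError); totality guard only
    else pvPassB graph rest reach changed

lemma pvPassB_count (graph : List (List Int)) :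
    ∀ is reach changed, (pvPassB graph is reach changed).1.count false ≤ reach.count false ∧
      ((pvPassB graph is reach changed).2 = true → changed = true ∨
        (pvPassB graph is reach changed).1.count false < reach.count false) := by
  intro is
  induction is with
  | nil => intro reach changed; simp [pvPassB]
  | cons i rest ih =>
    intro reach changed
    by_cases hc : (reach.getD i false = false && pvNearB graph reach i (List.range graph.length)) = true
    · by_cases hl : i < reach.length
      · have hset := pv_count_false_set reach i hl (by
          revert hc; cases hg : reach.getD i false <;> simp [hg])
        have h := ih (reach.set i true) true
        constructor
        · simp only [pvPassB, hc, if_pos, hl, dif_pos]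
          exact le_trans h.1 (le_of_lt hset)
        · intro _
          right
          simp only [pvPassB, hc, if_pos, hl, dif_pos]
          exact lt_of_le_of_lt h.1 hset
      · have h := ih reach changed
        simpa only [pvPassB, hc, if_pos, hl, dif_neg, not_false_iff] using h
    · have h := ih reach changed
      simpa only [pvPassB, hc, if_neg, Bool.not_eq_true] using h

-- the `while changed:` loop
def pvLoopB (graph : List (List Int)) (reach : List Bool) : List Bool :=
  let r := pvPassB graph (List.range graph.length) reach false
  if h : r.2 = true then pvLoopB graph r.1 else r.1
termination_by reach.count false
decreasing_by
  have := pvPassB_count graph (List.range graph.length) reach false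
  rcases this.2 h with h' | h'
  · exact absurd h' (by simp)
  · exact h'

def DFS_alt (graph : List (List Int)) : String :=
  let n := graph.length
  let reach := pvLoopB graph ((List.replicate n false).set 0 true)
  if 2 ≤ n ∧ reach.getD (n - 1) false = true then "happy" else "sad"

-- ===== PRECONDITION & SPEC =====
-- Pre_ excludes exactly the inputs where Python A raises IndexError: the empty list (visited[0])
-- and, when there are at least two points, rows with fewer than two coordinates
-- (graph[i][0]/graph[i][1]; with a single point no coordinate is ever read).
def Pre_DFS (graph : List (List Int)) : Prop :=
  graph ≠ [] ∧ (2 ≤ graph.length → ∀ row ∈ graph, 2 ≤ row.length)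
instance (graph : List (List Int)) : Decidable (Pre_DFS graph) := by unfold Pre_DFS; infer_instance

def pvWitness_DFS : List (List Int) := [[0, 0], [500, 500]]

def Spec_DFS (graph : List (List Int)) (out : String) : Prop := out = DFS_alt graph
instance (graph : List (List Int)) (out : String) : Decidable (Spec_DFS graph out) := by unfold Spec_DFS; infer_instance

-- ===== CLAIM (what is proved, stated in full; the proofs are below) =====
def Claim_equal_DFS : Prop := ∀ (graph : List (List Int)), Dom_DFS graph → Pre_DFS graph → Spec_DFS graph (DFS graph)


-- ===== LEMMAS AND PROOFS =====

-- getD / set / replicate helpers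
lemma pv_getD_set_self (l : List Bool) (k : Nat) (h : k < l.length) :
    (l.set k true).getD k false = true := by
  induction l generalizing k with
  | nil => simp at h
  | cons b t ih =>
    cases k with
    | zero => simp [List.getD]
    | succ k =>
      simp only [List.set]
      simpa [List.getD] using ih k (by simpa using h)

lemma pv_getD_set_ne (l : List Bool) (k j : Nat) (h : j ≠ k) :
    (l.set k true).getD j false = l.getD j false := by
  induction l generalizing k j with
  | nil => simp
  | cons b t ih =>
    cases k with
    | zero =>
      cases j with
      | zero => exact absurd rfl h
      | succ j => simp [List.getD]
    | succ k =>
      cases j with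
      | zero => simp [List.getD]
      | succ j =>
        simp only [List.set]
        simpa [List.getD] using ih k j (by omega)

lemma pv_getD_replicate (n i : Nat) : (List.replicate n false).getD i false = false := by
  induction n generalizing i with
  | zero => simp [List.getD]
  | succ n ih =>
    cases i with
    | zero => simp [List.replicate, List.getD]
    | succ i => simpa [List.replicate, List.getD] using ih i

-- reachability from point 0 along Manhattan-distance-≤-1000 steps
inductive ReachP : List (List Int) → Nat → Prop where
  | base (graph : List (List Int)) : ReachP graph 0
  | step {graph : List (List Int)} {j i : Nat} :
      ReachP graph j → i < graph.length → pvDistA graph i j ≤ 1000 → ReachP graph i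

-- the condition both programs answer: "happy" iff the last point is reachable (and exists)
def CReach (graph : List (List Int)) : Prop :=
  2 ≤ graph.length ∧ ReachP graph (graph.length - 1)

lemma reach_lt {graph : List (List Int)} {i : Nat} (h0 : 0 < graph.length)
    (h : ReachP graph i) : i < graph.length := by
  induction h with
  | base => exact h0
  | step _ hi _ _ => exact hi

lemma reach_marked {graph : List (List Int)} (v : List Bool) (hn : 0 < graph.length)
    (h0 : v.getD 0 false = true)
    (hcl : ∀ i j, i < graph.length → j < graph.length → v.getD j false = true →
      pvDistA graph i j ≤ 1000 → v.getD i false = true)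
    {i : Nat} (hi : ReachP graph i) : v.getD i false = true := by
  induction hi with
  | base => exact h0
  | step hj hilt hd ih => exact hcl _ _ hilt (reach_lt hn hj) ih hd

-- characterisation of A's inner scan
lemma pvScanA_none {graph : List (List Int)} {v : List Bool} {cur : Nat} :
    ∀ {is : List Nat}, pvScanA graph v cur is = none →
      ∃ i ∈ is, v.getD i false = false ∧ pvDistA graph i cur ≤ 1000 ∧ i = graph.length - 1 := by
  intro is
  induction is with
  | nil => intro h; simp [pvScanA] at h
  | cons i rest ih =>
    intro h
    simp only [pvScanA] at h
    split_ifs at h with h1 h2 h3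
    · exact ⟨i, by simp, h1, h2, h3⟩
    · cases hs : pvScanA graph v cur rest with
      | none =>
        obtain ⟨x, hx, p⟩ := ih hs
        exact ⟨x, List.mem_cons_of_mem _ hx, p⟩
      | some ps => rw [hs] at h; simp at h
    · obtain ⟨x, hx, p⟩ := ih h
      exact ⟨x, List.mem_cons_of_mem _ hx, p⟩
    · obtain ⟨x, hx, p⟩ := ih h
      exact ⟨x, List.mem_cons_of_mem _ hx, p⟩

lemma pvScanA_some {graph : List (List Int)} {v : List Bool} {cur : Nat} :
    ∀ {is ps : List Nat}, pvScanA graph v cur is = some ps →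
      (∀ x, x ∈ ps ↔ x ∈ is ∧ v.getD x false = false ∧ pvDistA graph x cur ≤ 1000) ∧
      (graph.length - 1) ∉ ps := by
  intro is
  induction is with
  | nil =>
    intro ps h
    simp [pvScanA] at h
    subst h
    simp
  | cons i rest ih =>
    intro ps h
    simp only [pvScanA] at h
    split_ifs at h with h1 h2 h3
    · cases hs : pvScanA graph v cur rest with
      | none => rw [hs] at h; simp at h
      | some qs =>
        rw [hs] at h
        simp only [Option.some.injEq] at h
        subst h
        obtain ⟨hmem, hne⟩ := ih hs
        constructor
        · intro x
          constructor
          · intro hx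
            rcases List.mem_cons.mp hx with rfl | hx
            · exact ⟨List.mem_cons_self, h1, h2⟩
            · obtain ⟨a, b⟩ := (hmem x).mp hx
              exact ⟨List.mem_cons_of_mem _ a, b⟩
          · rintro ⟨hx, hp⟩
            rcases List.mem_cons.mp hx with rfl | hx
            · exact List.mem_cons_self
            · exact List.mem_cons_of_mem _ ((hmem x).mpr ⟨hx, hp⟩)
        · intro hx
          rcases List.mem_cons.mp hx with he | hx
          · exact h3 he.symm
          · exact hne hx
    · obtain ⟨hmem, hne⟩ := ih h
      refine ⟨?_, hne⟩
      intro x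
      rw [hmem x]
      constructor
      · rintro ⟨a, b⟩; exact ⟨List.mem_cons_of_mem _ a, b⟩
      · rintro ⟨hx, hp⟩
        rcases List.mem_cons.mp hx with rfl | hx
        · exact absurd hp.2 h2
        · exact ⟨hx, hp⟩
    · obtain ⟨hmem, hne⟩ := ih h
      refine ⟨?_, hne⟩
      intro x
      rw [hmem x]
      constructor
      · rintro ⟨a, b⟩; exact ⟨List.mem_cons_of_mem _ a, b⟩
      · rintro ⟨hx, hp⟩
        rcases List.mem_cons.mp hx with rfl | hx
        · exact absurd hp.1 h1
        · exact ⟨hx, hp⟩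

-- the invariant of A's while-loop
def InvA (graph : List (List Int)) (v : List Bool) (st : List Nat) : Prop :=
  v.length = graph.length ∧
  (∀ x ∈ st, x < graph.length) ∧
  (∀ x ∈ st, ReachP graph x) ∧
  (∀ i, v.getD i false = true → ReachP graph i) ∧
  (2 ≤ graph.length → v.getD (graph.length - 1) false = false ∧ (graph.length - 1) ∉ st) ∧
  (∀ i j, i < graph.length → j < graph.length → v.getD j false = true →
    v.getD i false = false → pvDistA graph i j ≤ 1000 → i ∈ st) ∧
  (v.getD 0 false = true ∨ 0 ∈ st)

lemma DFSloopA_cons (graph : List (List Int)) (v : List Bool) (cur : Nat) (rest : List Nat) :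
    DFSloopA graph v (cur :: rest) =
      if v.getD cur false then DFSloopA graph v rest
      else if _h : cur < v.length then
        match pvScanA graph (v.set cur true) cur (List.range graph.length) with
        | none => "happy"
        | some ps => DFSloopA graph (v.set cur true) (ps.reverse ++ rest)
      else "sad" := by
  rw [DFSloopA]

lemma loopA_main (graph : List (List Int)) :
    ∀ v st, InvA graph v st →
      (DFSloopA graph v st = "happy" ∧ CReach graph) ∨
      (DFSloopA graph v st = "sad" ∧ ¬ CReach graph) := by
  intro v st
  induction v, st using DFSloopA.induct graph with
  | case1 v =>
    intro hinv
    obtain ⟨hlen, h2st, h3st, h4, h5, h6, h7⟩ := hinv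
    right
    refine ⟨by simp [DFSloopA], ?_⟩
    rintro ⟨h2, hr⟩
    have h0v : v.getD 0 false = true := by
      rcases h7 with h | h
      · exact h
      · simp at h
    have hmk : v.getD (graph.length - 1) false = true := by
      refine reach_marked v (by omega) h0v ?_ hr
      intro i j hi hj hvj hd
      by_cases hgi : v.getD i false = true
      · exact hgi
      · have := h6 i j hi hj hvj (by revert hgi; cases v.getD i false <;> simp) hd
        simp at this
    rw [(h5 h2).1] at hmk
    simp at hmk
  | case2 v cur rest hvis ih =>
    intro hinv
    obtain ⟨hlen, h2st, h3st, h4, h5, h6, h7⟩ := hinv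
    have hstep : DFSloopA graph v (cur :: rest) = DFSloopA graph v rest := by
      rw [DFSloopA_cons, if_pos hvis]
    have newinv : InvA graph v rest := by
      refine ⟨hlen, fun x hx => h2st x (List.mem_cons_of_mem _ hx),
        fun x hx => h3st x (List.mem_cons_of_mem _ hx), h4,
        fun h2 => ⟨(h5 h2).1, fun hm => (h5 h2).2 (List.mem_cons_of_mem _ hm)⟩, ?_, ?_⟩
      · intro i j hi hj hvj hvi hd
        rcases List.mem_cons.mp (h6 i j hi hj hvj hvi hd) with rfl | hr
        · rw [hvis] at hvi; simp at hvi
        · exact hr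
      · rcases h7 with hv0 | h0s
        · exact Or.inl hv0
        · rcases List.mem_cons.mp h0s with he | hr
          · subst he; exact Or.inl hvis
          · exact Or.inr hr
    rw [hstep]
    exact ih newinv
  | case3 v cur rest hvis hcl hscan =>
    intro hinv
    obtain ⟨hlen, h2st, h3st, h4, h5, h6, h7⟩ := hinv
    left
    refine ⟨by rw [DFSloopA_cons, if_neg hvis, dif_pos hcl, hscan], ?_⟩
    obtain ⟨i, himem, hif, hid, hieq⟩ := pvScanA_none hscan
    have hcurmem : cur ∈ cur :: rest := List.mem_cons_self
    have hrc : ReachP graph cur := h3st cur hcurmem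
    have hcn : cur < graph.length := h2st cur hcurmem
    have hin : i < graph.length := List.mem_range.mp himem
    have hic : i ≠ cur := by
      intro he
      subst he
      rw [pv_getD_set_self v i hcl] at hif
      simp at hif
    refine ⟨by omega, ?_⟩
    rw [← hieq]
    exact ReachP.step hrc hin hid
  | case4 v cur rest hvis hcl ps hscan ih =>
    intro hinv
    obtain ⟨hlen, h2st, h3st, h4, h5, h6, h7⟩ := hinv
    obtain ⟨hmem, hnot⟩ := pvScanA_some hscan
    have hcurmem : cur ∈ cur :: rest := List.mem_cons_self
    have hcn : cur < graph.length := h2st cur hcurmem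
    have hrc : ReachP graph cur := h3st cur hcurmem
    have hstep : DFSloopA graph v (cur :: rest) =
        DFSloopA graph (v.set cur true) (ps.reverse ++ rest) := by
      rw [DFSloopA_cons, if_neg hvis, dif_pos hcl, hscan]
    have newinv : InvA graph (v.set cur true) (ps.reverse ++ rest) := by
      refine ⟨by simp [hlen], ?_, ?_, ?_, ?_, ?_, ?_⟩
      · intro x hx
        rcases (List.mem_append.mp hx) with hx | hx
        · exact List.mem_range.mp ((hmem x).mp (List.mem_reverse.mp hx)).1
        · exact h2st x (List.mem_cons_of_mem _ hx)
      · intro x hx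
        rcases (List.mem_append.mp hx) with hx | hx
        · obtain ⟨hxr, _, hxd⟩ := (hmem x).mp (List.mem_reverse.mp hx)
          exact ReachP.step hrc (List.mem_range.mp hxr) hxd
        · exact h3st x (List.mem_cons_of_mem _ hx)
      · intro i hi
        by_cases hne : i = cur
        · subst hne; exact hrc
        · rw [pv_getD_set_ne _ _ _ hne] at hi
          exact h4 i hi
      · intro h2
        obtain ⟨hv5, hs5⟩ := h5 h2
        have hcne : cur ≠ graph.length - 1 := fun he => hs5 (by rw [← he]; exact hcurmem)
        refine ⟨?_, ?_⟩
        · rw [pv_getD_set_ne _ _ _ (Ne.symm hcne)]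
          exact hv5
        · intro hmem'
          rcases List.mem_append.mp hmem' with hx | hx
          · exact hnot (List.mem_reverse.mp hx)
          · exact hs5 (List.mem_cons_of_mem _ hx)
      · intro i j hi hj hvj hvi hd
        have hine : i ≠ cur := by
          intro he
          subst he
          rw [pv_getD_set_self v i hcl] at hvi
          simp at hvi
        by_cases hjc : j = cur
        · subst hjc
          have : i ∈ ps := (hmem i).mpr ⟨List.mem_range.mpr hi, hvi, hd⟩
          exact List.mem_append.mpr (Or.inl (List.mem_reverse.mpr this))
        · have hvj' : v.getD j false = true := by rwa [pv_getD_set_ne _ _ _ hjc] at hvj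
          have hvi' : v.getD i false = false := by rwa [pv_getD_set_ne _ _ _ hine] at hvi
          rcases List.mem_cons.mp (h6 i j hi hj hvj' hvi' hd) with rfl | hr
          · exact absurd rfl hine
          · exact List.mem_append.mpr (Or.inr hr)
      · by_cases hc0 : cur = 0
        · subst hc0
          exact Or.inl (pv_getD_set_self v 0 hcl)
        · rcases h7 with hv0 | h0s
          · exact Or.inl (by rw [pv_getD_set_ne _ _ _ (Ne.symm hc0)]; exact hv0)
          · rcases List.mem_cons.mp h0s with he | hr
            · exact absurd he.symm hc0
            · exact Or.inr (List.mem_append.mpr (Or.inr hr))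
    rw [hstep]
    exact ih newinv
  | case5 v cur rest hvis hcl =>
    intro hinv
    exact absurd (by rw [hinv.1]; exact hinv.2.1 cur List.mem_cons_self) hcl

-- characterisation of B's pvNearB
lemma pvDistBA (graph : List (List Int)) (i j : Nat) : pvDistB graph i j = pvDistA graph i j := rfl

lemma pvNearB_iff (graph : List (List Int)) (reach : List Bool) (i : Nat) :
    ∀ js, pvNearB graph reach i js = true ↔
      ∃ j ∈ js, reach.getD j false = true ∧ pvDistA graph i j ≤ 1000 := by
  intro js
  induction js with
  | nil => simp [pvNearB]
  | cons j rest ih =>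
    simp [pvNearB, ih, pvDistBA]

-- soundness invariant of B's reach array
def SoundB (graph : List (List Int)) (reach : List Bool) : Prop :=
  reach.length = graph.length ∧ reach.getD 0 false = true ∧
  ∀ i, reach.getD i false = true → ReachP graph i

lemma pvPassB_sound (graph : List (List Int)) :
    ∀ is reach changed, (∀ i ∈ is, i < graph.length) → SoundB graph reach →
      SoundB graph (pvPassB graph is reach changed).1 := by
  intro is
  induction is with
  | nil => intro reach changed _ hs; simpa [pvPassB] using hs
  | cons i rest ih =>
    intro reach changed hlt hs
    simp only [pvPassB]
    split_ifs with hc hl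
    · refine ih _ _ (fun x hx => hlt x (List.mem_cons_of_mem _ hx)) ?_
      obtain ⟨hlen, h0, hsnd⟩ := hs
      simp only [Bool.and_eq_true, decide_eq_true_eq] at hc
      refine ⟨by simp [hlen], ?_, ?_⟩
      · by_cases h0i : (0 : Nat) = i
        · rw [← h0i]; exact pv_getD_set_self reach 0 (h0i ▸ hl)
        · rw [pv_getD_set_ne _ _ _ h0i]; exact h0
      · intro x hx
        by_cases hxi : x = i
        · subst hxi
          obtain ⟨j, hjm, hj, hd⟩ := (pvNearB_iff graph reach x _).mp hc.2
          exact ReachP.step (hsnd j hj) (hlt x List.mem_cons_self) hd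
        · rw [pv_getD_set_ne _ _ _ hxi] at hx
          exact hsnd x hx
    · exact ih _ _ (fun x hx => hlt x (List.mem_cons_of_mem _ hx)) hs
    · exact ih _ _ (fun x hx => hlt x (List.mem_cons_of_mem _ hx)) hs

lemma pvPassB_true (graph : List (List Int)) :
    ∀ is reach, (pvPassB graph is reach true).2 = true := by
  intro is
  induction is with
  | nil => intro reach; simp [pvPassB]
  | cons i rest ih =>
    intro reach
    simp only [pvPassB]
    split_ifs <;> apply ih

lemma pvPassB_nochange (graph : List (List Int)) :
    ∀ is reach, (∀ i ∈ is, i < reach.length) → (pvPassB graph is reach false).2 = false →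
      (pvPassB graph is reach false).1 = reach ∧
      ∀ i ∈ is, reach.getD i false = true ∨
        pvNearB graph reach i (List.range graph.length) = false := by
  intro is
  induction is with
  | nil => intro reach _ _; simp [pvPassB]
  | cons i rest ih =>
    intro reach hlt h2
    simp only [pvPassB] at h2 ⊢
    split_ifs at h2 ⊢ with hc hl
    · rw [pvPassB_true] at h2; simp at h2
    · exact absurd (hlt i List.mem_cons_self) hl
    · obtain ⟨h1, hrest⟩ := ih reach (fun x hx => hlt x (List.mem_cons_of_mem _ hx)) h2
      refine ⟨h1, ?_⟩
      intro x hx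
      rcases List.mem_cons.mp hx with rfl | hx
      · simp only [Bool.and_eq_true, decide_eq_true_eq, not_and] at hc
        by_cases hg : reach.getD x false = true
        · exact Or.inl hg
        · exact Or.inr (by
            have : reach.getD x false = false := by revert hg; cases reach.getD x false <;> simp
            revert hc this
            cases pvNearB graph reach x (List.range graph.length) <;> simp)
      · exact hrest x hx

lemma pvLoopB_eq (graph : List (List Int)) (reach : List Bool) :
    pvLoopB graph reach =
      if (pvPassB graph (List.range graph.length) reach false).2 = true then
        pvLoopB graph (pvPassB graph (List.range graph.length) reach false).1
      else (pvPassB graph (List.range graph.length) reach false).1 := by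
  rw [pvLoopB]
  rfl

lemma pvLoopB_stop (graph : List (List Int)) (reach : List Bool) (hs : SoundB graph reach)
    (h : ¬ (pvPassB graph (List.range graph.length) reach false).2 = true) :
    SoundB graph (pvLoopB graph reach) ∧
      (∀ i, i < graph.length → (pvLoopB graph reach).getD i false = false →
        pvNearB graph (pvLoopB graph reach) i (List.range graph.length) = false) := by
  have hno := pvPassB_nochange graph (List.range graph.length) reach
    (by intro x hx; rw [hs.1]; exact List.mem_range.mp hx) (by simpa using h)
  rw [pvLoopB_eq, if_neg h, hno.1]
  refine ⟨hs, ?_⟩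
  intro i hi hfalse
  rcases hno.2 i (List.mem_range.mpr hi) with hg | hg
  · rw [hg] at hfalse; simp at hfalse
  · exact hg

lemma pvLoopB_main (graph : List (List Int)) :
    ∀ (k : Nat) (reach : List Bool), reach.count false ≤ k → SoundB graph reach →
      SoundB graph (pvLoopB graph reach) ∧
      (∀ i, i < graph.length → (pvLoopB graph reach).getD i false = false →
        pvNearB graph (pvLoopB graph reach) i (List.range graph.length) = false) := by
  intro k
  induction k with
  | zero =>
    intro reach hk hs
    by_cases h : (pvPassB graph (List.range graph.length) reach false).2 = true
    · rcases (pvPassB_count graph (List.range graph.length) reach false).2 h with h' | h'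
      · simp at h'
      · omega
    · exact pvLoopB_stop graph reach hs h
  | succ k ih =>
    intro reach hk hs
    by_cases h : (pvPassB graph (List.range graph.length) reach false).2 = true
    · rcases (pvPassB_count graph (List.range graph.length) reach false).2 h with h' | h'
      · simp at h'
      · have hs' := pvPassB_sound graph (List.range graph.length) reach false
          (by intro x hx; exact List.mem_range.mp hx) hs
        have hres := ih (pvPassB graph (List.range graph.length) reach false).1 (by omega) hs'
        rw [pvLoopB_eq, if_pos h]
        exact hres
    · exact pvLoopB_stop graph reach hs h

-- the two ports answer the same question
lemma DFS_char (graph : List (List Int)) (h1 : graph ≠ []) :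
    (DFS graph = "happy" ∧ CReach graph) ∨ (DFS graph = "sad" ∧ ¬ CReach graph) := by
  have hn : 0 < graph.length := List.length_pos_iff.mpr h1
  apply loopA_main
  refine ⟨by simp, ?_, ?_, ?_, ?_, ?_, ?_⟩
  · intro x hx
    simp at hx
    subst hx
    exact hn
  · intro x hx
    simp at hx
    subst hx
    exact ReachP.base graph
  · intro i hi
    rw [pv_getD_replicate] at hi
    simp at hi
  · intro h2
    refine ⟨pv_getD_replicate _ _, ?_⟩
    simp
    omega
  · intro i j _ _ hj _ _
    rw [pv_getD_replicate] at hj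
    simp at hj
  · exact Or.inr (by simp)

lemma DFS_alt_char (graph : List (List Int)) (h1 : graph ≠ []) :
    (DFS_alt graph = "happy" ∧ CReach graph) ∨ (DFS_alt graph = "sad" ∧ ¬ CReach graph) := by
  have hn : 0 < graph.length := List.length_pos_iff.mpr h1
  have hs0 : SoundB graph ((List.replicate graph.length false).set 0 true) := by
    refine ⟨by simp, pv_getD_set_self _ _ (by simpa using hn), ?_⟩
    intro i hi
    by_cases h0 : i = 0
    · subst h0; exact ReachP.base graph
    · rw [pv_getD_set_ne _ _ _ h0, pv_getD_replicate] at hi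
      simp at hi
  obtain ⟨hsound, hclosed⟩ := pvLoopB_main graph
    (((List.replicate graph.length false).set 0 true).count false) _ le_rfl hs0
  by_cases hcond : 2 ≤ graph.length ∧
      (pvLoopB graph ((List.replicate graph.length false).set 0 true)).getD
        (graph.length - 1) false = true
  · left
    refine ⟨by simp only [DFS_alt]; rw [if_pos hcond], hcond.1, hsound.2.2 _ hcond.2⟩
  · right
    refine ⟨by simp only [DFS_alt]; rw [if_neg hcond], ?_⟩
    rintro ⟨h2, hr⟩
    apply hcond
    refine ⟨h2, ?_⟩
    refine reach_marked _ hn hsound.2.1 ?_ hr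
    intro i j hi hj hvj hd
    by_cases hgi : (pvLoopB graph ((List.replicate graph.length false).set 0 true)).getD i false = true
    · exact hgi
    · have hfi : (pvLoopB graph ((List.replicate graph.length false).set 0 true)).getD i false = false := by
        revert hgi
        cases (pvLoopB graph ((List.replicate graph.length false).set 0 true)).getD i false <;> simp
      have hnf := hclosed i hi hfi
      have hnt : pvNearB graph (pvLoopB graph ((List.replicate graph.length false).set 0 true)) i
          (List.range graph.length) = true :=
        (pvNearB_iff graph _ i _).mpr ⟨j, List.mem_range.mpr hj, hvj, hd⟩
      rw [hnt] at hnf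
      simp at hnf

-- ===== VERDICT (by name: the statement is the Claim_ definition above) =====
theorem DFS_spec : Claim_equal_DFS := by
  intro graph _hdom hpre
  unfold Spec_DFS
  obtain ⟨h1, _⟩ := hpre
  rcases DFS_char graph h1 with ⟨ha, hc⟩ | ⟨ha, hc⟩ <;>
    rcases DFS_alt_char graph h1 with ⟨hb, hc'⟩ | ⟨hb, hc'⟩
  · rw [ha, hb]
  · exact absurd hc hc'
  · exact absurd hc' hc
  · rw [ha, hb]
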